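-- pv_equiv track=rewrite | github.com/teruuj1/algoths | smth/1.py | find_max_with_counter
-- ===== SOURCE A (Python) =====
-- def find_max_with_counter(arr):
--     """Находит максимальный элемент и подсчитывает присваивания"""
--     if not arr:
--         return None, 0
--
--     max_val = arr[0]
--     assignments = 1  # первое присваивание max_val = arr[0]
--
--     for i in range(1, len(arr)):
--         if arr[i] > max_val:
--             max_val = arr[i]
--             assignments += 1  # счетчик увеличивается при каждом присваивании
--
--     return max_val, assignments
-- ===== SOURCE B (Python) =====
-- from itertools import accumulate
--
-- def find_max_with_counter(arr):
--     """Находит максимальный элемент и подсчитывает присваивания"""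
--     if not arr:
--         return None, 0
--     pm = list(accumulate(arr, lambda a, b: b if b > a else a))
--     assignments = 1 + sum(1 for p, q in zip(pm, pm[1:]) if q > p)
--     return pm[-1], assignments
-- ===== Notes on version B (the rewrite author's own statement) =====
-- stated objective: alternative
-- what changed: Replaces A's single fused scan that mutates (max_val, assignments) with a materialised prefix-maximum table (itertools.accumulate with strict '>') followed by a separate pass counting strict increases between consecutive table entries.
import Mathlib
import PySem

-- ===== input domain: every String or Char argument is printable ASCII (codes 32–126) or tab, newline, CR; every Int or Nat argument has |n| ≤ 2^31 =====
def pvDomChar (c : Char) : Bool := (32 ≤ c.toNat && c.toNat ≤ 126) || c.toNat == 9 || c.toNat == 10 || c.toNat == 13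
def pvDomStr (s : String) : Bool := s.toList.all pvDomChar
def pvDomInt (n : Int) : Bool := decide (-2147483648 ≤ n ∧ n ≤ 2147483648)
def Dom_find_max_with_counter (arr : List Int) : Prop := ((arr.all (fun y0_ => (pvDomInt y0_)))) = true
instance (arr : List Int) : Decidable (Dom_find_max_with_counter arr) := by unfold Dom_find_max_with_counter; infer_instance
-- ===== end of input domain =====

-- B replaces A's fused scan with a prefix-maximum table plus a transition-counting pass (alternative decomposition, same cost).

-- ===== PORT A =====
-- A scans arr[1:] keeping (max_val, assignments), bumping both when arr[i] > max_val.
def find_max_with_counter (arr : List Int) : Option Int × Int :=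
  match arr with
  | [] => (none, 0)
  | a :: rest =>
    let s := rest.foldl (fun (s : Int × Int) x => if x > s.1 then (x, s.2 + 1) else s) (a, 1)
    (some s.1, s.2)

-- ===== PORT B =====
-- itertools.accumulate(arr, lambda a, b: b if b > a else a): running strict-max table.
def pmAccum (a : Int) (rest : List Int) : List Int :=
  match rest with
  | [] => [a]
  | b :: t => a :: pmAccum (if b > a then b else a) t

def find_max_with_counter_alt (arr : List Int) : Option Int × Int :=
  match arr with
  | [] => (none, 0)
  | a :: rest =>
    let pm := pmAccum a rest
    let assignments := 1 + ((pm.zip pm.tail).filter (fun pq => pq.2 > pq.1)).length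
    (some (pm.getLastD 0), assignments)

-- ===== PRECONDITION & SPEC =====
def Spec_find_max_with_counter (arr : List Int) (out : Option Int × Int) : Prop := out = find_max_with_counter_alt arr
instance (arr : List Int) (out : Option Int × Int) : Decidable (Spec_find_max_with_counter arr out) := by unfold Spec_find_max_with_counter; infer_instance

-- ===== CLAIM (what is proved, stated in full; the proofs are below) =====
def Claim_equal_find_max_with_counter : Prop := ∀ (arr : List Int), Dom_find_max_with_counter arr → Spec_find_max_with_counter arr (find_max_with_counter arr)

-- ===== LEMMAS AND PROOFS =====

theorem pmAccum_head : ∀ (t : List Int) (a : Int), ∃ l, pmAccum a t = a :: l := by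
  intro t a
  cases t <;> exact ⟨_, rfl⟩

theorem pmAccum_key : ∀ (rest : List Int) (a : Int) (c : Int),
    rest.foldl (fun (s : Int × Int) x => if x > s.1 then (x, s.2 + 1) else s) (a, c)
      = ((pmAccum a rest).getLastD 0,
         c + (((pmAccum a rest).zip (pmAccum a rest).tail).filter (fun pq => pq.2 > pq.1)).length) := by
  intro rest
  induction rest with
  | nil => intro a c; simp [pmAccum]
  | cons b t ih =>
    intro a c
    obtain ⟨l, hl⟩ := pmAccum_head t (if b > a then b else a)
    by_cases h : b > a
    · simp only [pmAccum, List.foldl, if_pos h]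
      rw [ih b (c + 1)]
      rw [if_pos h] at hl
      simp [hl, h]
      omega
    · simp only [pmAccum, List.foldl, if_neg h]
      rw [ih a c]
      rw [if_neg h] at hl
      simp [hl]

-- ===== VERDICT (by name: the statement is the Claim_ definition above) =====
theorem find_max_with_counter_spec : Claim_equal_find_max_with_counter := by
  intro arr _
  unfold Spec_find_max_with_counter find_max_with_counter find_max_with_counter_alt
  cases arr with
  | nil => rfl
  | cons a rest =>
    simp only [pmAccum_key rest a 1]
    push_cast
    ring_nf
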